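-- pv_equiv track=rewrite | github.com/victor0198utm/LFPC | LAB 3/FAF191, Caragiu Victor, Lab_3_ex25.py | search_productive_rules
-- ===== SOURCE A (Python) =====
-- def search_productive_rules(elliminated_renaming, productive_symbols, terminals):
-- 	search_again = False
-- 	for (key, value) in elliminated_renaming.items():
-- 		productive = False
-- 		if not key in productive_symbols:
-- 			for result in value:
-- 				productive_result = True
-- 				for symbol in result:
-- 					if not symbol in productive_symbols and not symbol in terminals:
-- 						productive_result = False
-- 				if productive_result:
-- 					productive = True
-- 		if productive:
-- 			productive_symbols.append(key)
-- 			search_again = True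
--
-- 	if search_again:
-- 		productive_symbols = search_productive_rules(elliminated_renaming, productive_symbols, terminals)
--
-- 	return productive_symbols
-- ===== SOURCE B (Python) =====
-- def search_productive_rules(elliminated_renaming, productive_symbols, terminals):
--     # Equivalence is about the return value; like A, this appends the new
--     # productive keys onto the productive_symbols list passed by the caller.
--     seen = set(productive_symbols)
--     ok = seen | set(terminals)
--     remaining = list(elliminated_renaming.items())
--     while True:
--         still = []
--         added = False
--         for key, value in remaining:
--             if key in seen:
--                 continue
--             if any(all(symbol in ok for symbol in result) for result in value):
--                 productive_symbols.append(key)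
--                 seen.add(key)
--                 ok.add(key)
--                 added = True
--             else:
--                 still.append((key, value))
--         if not added:
--             return productive_symbols
--         remaining = still
-- ===== Notes on version B (the rewrite author's own statement) =====
-- stated objective: faster
-- what changed: Replaces A's recursive full re-scans with O(n) list-membership tests by an iterative fixed-point loop that keeps set-based membership (seen/ok) and drops settled rules from a shrinking work list, so each rule is re-examined only while still unresolved.
import Mathlib
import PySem

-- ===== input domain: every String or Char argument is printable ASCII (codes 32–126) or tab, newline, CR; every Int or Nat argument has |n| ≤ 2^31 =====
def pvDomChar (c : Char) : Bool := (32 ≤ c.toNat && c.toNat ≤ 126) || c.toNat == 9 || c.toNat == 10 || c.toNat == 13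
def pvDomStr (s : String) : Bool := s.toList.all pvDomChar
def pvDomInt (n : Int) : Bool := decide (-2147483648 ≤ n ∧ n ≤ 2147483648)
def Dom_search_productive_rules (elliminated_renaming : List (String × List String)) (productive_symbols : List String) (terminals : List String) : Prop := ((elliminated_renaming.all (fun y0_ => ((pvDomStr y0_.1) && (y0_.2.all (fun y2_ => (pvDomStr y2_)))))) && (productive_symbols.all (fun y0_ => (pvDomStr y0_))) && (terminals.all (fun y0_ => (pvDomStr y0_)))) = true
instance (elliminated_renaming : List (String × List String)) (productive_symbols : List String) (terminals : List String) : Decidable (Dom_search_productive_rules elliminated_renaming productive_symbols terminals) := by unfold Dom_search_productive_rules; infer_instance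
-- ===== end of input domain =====

-- B replaces A's recursive re-scans with an iterative fixed-point loop that keeps a set
-- for membership tests and drops settled rules from the work list; same return value
-- (both A and B also append the new keys onto the caller's productive_symbols list).

-- ===== PORT A =====
-- one step of A's `for (key, value) in elliminated_renaming.items()` loop;
-- state = (productive_symbols, search_again)
def sprStepA (terminals : List String) (st : List String × Bool)
    (kv : String × List String) : List String × Bool :=
  let productive :=
    if !(st.1.contains kv.1) then
      -- `for result in value` with the `productive` flag
      kv.2.foldl (fun productive result =>
        -- `for symbol in result` with the `productive_result` flag
        let productive_result := result.toList.foldl (fun pr c =>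
          if !(st.1.contains (String.ofList [c])) && !(terminals.contains (String.ofList [c]))
          then false else pr) true
        if productive_result then true else productive) false
    else false
  if productive then (st.1 ++ [kv.1], true) else st

-- A's tail recursion `if search_again: recurse`; the Nat is a fuel bound only
-- (items.length + 1 rounds always suffice: every continued round adds a new key).
def sprLoopA (items : List (String × List String)) (terminals : List String) :
    Nat → List String → List String
  | 0, productive_symbols => productive_symbols
  | n + 1, productive_symbols =>
    let r := items.foldl (sprStepA terminals) (productive_symbols, false)
    if r.2 then sprLoopA items terminals n r.1 else r.1

def search_productive_rules (elliminated_renaming : List (String × List String))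
    (productive_symbols : List String) (terminals : List String) : List String :=
  let items := (PySem.Dict.ofList elliminated_renaming).items
  sprLoopA items terminals (items.length + 1) productive_symbols

-- ===== PORT B =====
-- `any(all(symbol in ok for symbol in result) for result in value)`
def sprProductive (ok : PySem.Set String) (value : List String) : Bool :=
  value.any (fun result => result.toList.all (fun c => ok.contains (String.ofList [c])))

-- one step of B's `for key, value in remaining` loop;
-- state = (productive_symbols, seen, ok, still, added)
def sprStepB (st : List String × PySem.Set String × PySem.Set String × List (String × List String) × Bool)
    (kv : String × List String) :
    List String × PySem.Set String × PySem.Set String × List (String × List String) × Bool :=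
  if PySem.Set.contains st.2.1 kv.1 then st
  else if sprProductive st.2.2.1 kv.2 then
    (st.1 ++ [kv.1], PySem.Set.add st.2.1 kv.1, PySem.Set.add st.2.2.1 kv.1, st.2.2.2.1, true)
  else (st.1, st.2.1, st.2.2.1, st.2.2.2.1 ++ [kv], st.2.2.2.2)

-- B's `while True` loop; the Nat is a fuel bound only (same bound as A's port)
def sprLoopB : Nat → List (String × List String) → List String →
    PySem.Set String → PySem.Set String → List String
  | 0, _, productive_symbols, _, _ => productive_symbols
  | n + 1, remaining, productive_symbols, seen, ok =>
    let r := remaining.foldl sprStepB (productive_symbols, seen, ok, [], false)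
    if !r.2.2.2.2 then r.1 else sprLoopB n r.2.2.2.1 r.1 r.2.1 r.2.2.1

def search_productive_rules_alt (elliminated_renaming : List (String × List String))
    (productive_symbols : List String) (terminals : List String) : List String :=
  let seen := PySem.Set.ofList productive_symbols
  let ok := PySem.Set.union seen terminals
  let remaining := (PySem.Dict.ofList elliminated_renaming).items
  sprLoopB (remaining.length + 1) remaining productive_symbols seen ok

-- ===== PRECONDITION & SPEC =====
def Spec_search_productive_rules (elliminated_renaming : List (String × List String)) (productive_symbols : List String) (terminals : List String) (out : List String) : Prop := out = search_productive_rules_alt elliminated_renaming productive_symbols terminals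
instance (elliminated_renaming : List (String × List String)) (productive_symbols : List String) (terminals : List String) (out : List String) : Decidable (Spec_search_productive_rules elliminated_renaming productive_symbols terminals out) := by unfold Spec_search_productive_rules; infer_instance

-- ===== CLAIM (what is proved, stated in full; the proofs are below) =====
def Claim_equal_search_productive_rules : Prop := ∀ (elliminated_renaming : List (String × List String)) (productive_symbols : List String) (terminals : List String), Dom_search_productive_rules elliminated_renaming productive_symbols terminals → Spec_search_productive_rules elliminated_renaming productive_symbols terminals (search_productive_rules elliminated_renaming productive_symbols terminals)

-- ===== LEMMAS AND PROOFS =====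

-- A's nested `productive` computation, named for the proofs
def sprAProd (P terminals : List String) (value : List String) : Bool :=
  value.foldl (fun productive result =>
    let productive_result := result.toList.foldl (fun pr c =>
      if !(P.contains (String.ofList [c])) && !(terminals.contains (String.ofList [c]))
      then false else pr) true
    if productive_result then true else productive) false

lemma sprStepA_eq (terminals : List String) (st : List String × Bool)
    (kv : String × List String) :
    sprStepA terminals st kv =
      if st.1.contains kv.1 then st
      else if sprAProd st.1 terminals kv.2 then (st.1 ++ [kv.1], true) else st := by
  unfold sprStepA sprAProd
  cases h : st.1.contains kv.1 <;> rfl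

-- a kill-flag loop is `all`
lemma foldl_kill {α : Type} (q : α → Bool) :
    ∀ (l : List α) (b : Bool),
      l.foldl (fun pr c => if q c then false else pr) b = (b && l.all (fun c => !q c)) := by
  intro l
  induction l with
  | nil => simp
  | cons c l ih =>
    intro b
    cases hq : q c
    · simp only [List.foldl_cons, hq, Bool.false_eq_true, if_false, ih, List.all_cons,
        Bool.not_false, Bool.true_and]
    · simp only [List.foldl_cons, hq, if_true, ih, List.all_cons, Bool.not_true,
        Bool.false_and, Bool.and_false]

-- a set-flag loop is `any`
lemma foldl_set {α : Type} (g : α → Bool) :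
    ∀ (l : List α) (b : Bool),
      l.foldl (fun p r => if g r then true else p) b = (b || l.any g) := by
  intro l
  induction l with
  | nil => simp
  | cons r l ih =>
    intro b
    cases hg : g r
    · simp only [List.foldl_cons, hg, Bool.false_eq_true, if_false, ih, List.any_cons,
        Bool.false_or]
    · simp only [List.foldl_cons, hg, if_true, ih, List.any_cons, Bool.true_or,
        Bool.or_true]

-- A's flag-loop productivity test is B's any/all over the `ok` set
lemma sprAProd_eq (terminals P : List String) (ok : PySem.Set String) (value : List String)
    (hok : ∀ s : String, s ∈ ok ↔ s ∈ P ∨ s ∈ terminals) :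
    sprAProd P terminals value = sprProductive ok value := by
  unfold sprAProd sprProductive
  simp only [foldl_kill, foldl_set, Bool.false_or, Bool.true_and]
  congr 1
  funext result
  congr 1
  funext c
  have := hok (String.ofList [c])
  cases hP : P.contains (String.ofList [c]) <;>
    cases hT : terminals.contains (String.ofList [c]) <;>
    cases hO : PySem.Set.contains ok (String.ofList [c]) <;>
    simp_all [PySem.Set.contains_eq_listContains]

-- A's fold only appends to productive_symbols
lemma sprFoldA_prefix (terminals : List String) :
    ∀ (items : List (String × List String)) (P : List String) (sa : Bool),
      P <+: (items.foldl (sprStepA terminals) (P, sa)).1 := by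
  intro items
  induction items with
  | nil => intro P sa; simp
  | cons kv rest ih =>
    intro P sa
    simp only [List.foldl_cons, sprStepA_eq]
    cases h1 : P.contains kv.1
    · cases h2 : sprAProd P terminals kv.2
      · simp only [Bool.false_eq_true, if_false]
        exact ih P sa
      · simp only [Bool.false_eq_true, if_false, if_true]
        exact List.IsPrefix.trans (List.prefix_append P [kv.1]) (ih (P ++ [kv.1]) true)
    · simp only [if_true]
      exact ih P sa

-- every symbol A's fold appends is a key of one of the items
lemma sprFoldA_mem (terminals : List String) :
    ∀ (items : List (String × List String)) (P : List String) (sa : Bool) (s : String),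
      s ∈ (items.foldl (sprStepA terminals) (P, sa)).1 → s ∈ P ∨ s ∈ items.map Prod.fst := by
  intro items
  induction items with
  | nil => intro P sa s h; simp_all
  | cons kv rest ih =>
    intro P sa s h
    simp only [List.foldl_cons, sprStepA_eq] at h
    cases h1 : P.contains kv.1 <;> rw [h1] at h
    · cases h2 : sprAProd P terminals kv.2 <;> rw [h2] at h
      · simp only [Bool.false_eq_true, if_false] at h
        rcases ih P sa s h with h' | h' <;> simp [h']
      · simp only [Bool.false_eq_true, if_false, if_true] at h
        rcases ih (P ++ [kv.1]) true s h with h' | h'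
        · rcases List.mem_append.mp h' with h'' | h'' <;> simp_all
        · simp [h']
    · simp only [if_true] at h
      rcases ih P sa s h with h' | h' <;> simp [h']

-- one round: A's pass over all items = B's pass over the filtered work list
lemma sprRound_eq (terminals : List String) :
    ∀ (items : List (String × List String)) (P : List String) (b : Bool)
      (seen ok : PySem.Set String) (still : List (String × List String))
      (p : String × List String → Bool),
      (items.map Prod.fst).Nodup →
      (∀ s : String, s ∈ seen ↔ s ∈ P) →
      (∀ s : String, s ∈ ok ↔ s ∈ P ∨ s ∈ terminals) →
      (∀ kv ∈ items, p kv = false → kv.1 ∈ P) →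
      items.foldl (sprStepA terminals) (P, b) =
        (((items.filter p).foldl sprStepB (P, seen, ok, still, b)).1,
         ((items.filter p).foldl sprStepB (P, seen, ok, still, b)).2.2.2.2) ∧
      (∀ s : String, s ∈ ((items.filter p).foldl sprStepB (P, seen, ok, still, b)).2.1 ↔
        s ∈ (items.foldl (sprStepA terminals) (P, b)).1) ∧
      (∀ s : String, s ∈ ((items.filter p).foldl sprStepB (P, seen, ok, still, b)).2.2.1 ↔
        s ∈ (items.foldl (sprStepA terminals) (P, b)).1 ∨ s ∈ terminals) ∧
      ((items.filter p).foldl sprStepB (P, seen, ok, still, b)).2.2.2.1 =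
        still ++ items.filter (fun kv =>
          p kv && !((items.foldl (sprStepA terminals) (P, b)).1.contains kv.1)) := by
  intro items
  induction items with
  | nil =>
    intro P b seen ok still p hnd hseen hok hp
    exact ⟨rfl, hseen, hok, by simp⟩
  | cons kv rest ih =>
    intro P b seen ok still p hnd hseen hok hp
    have hnd' : (rest.map Prod.fst).Nodup := (List.nodup_cons.mp hnd).2
    have hknd : kv.1 ∉ rest.map Prod.fst := (List.nodup_cons.mp hnd).1
    have hp' : ∀ kv' ∈ rest, p kv' = false → kv'.1 ∈ P :=
      fun kv' h hf => hp kv' (List.mem_cons_of_mem kv h) hf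
    cases hpkv : p kv
    · -- kv is not on B's work list: its key is already productive, A skips it too
      have hmemP : kv.1 ∈ P := hp kv List.mem_cons_self hpkv
      have hc : P.contains kv.1 = true := List.contains_iff_mem.mpr hmemP
      have hcf : ∀ sa : Bool, ((rest.foldl (sprStepA terminals) (P, sa)).1.contains kv.1) = true :=
        fun sa => List.contains_iff_mem.mpr
          ((sprFoldA_prefix terminals rest P sa).subset hmemP)
      simp only [List.filter_cons, hpkv, Bool.false_eq_true, if_false,
        List.foldl_cons, sprStepA_eq, hc, if_true]
      obtain ⟨h1, h2, h3, h4⟩ := ih P b seen ok still p hnd' hseen hok hp'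
      exact ⟨h1, h2, h3, by rw [h4, hcf b]; simp⟩
    · -- kv is on B's work list
      simp only [List.filter_cons, hpkv, if_true, List.foldl_cons, sprStepA_eq]
      have hseenc : PySem.Set.contains seen kv.1 = P.contains kv.1 := by
        cases hPc : P.contains kv.1 <;>
          cases hSc : PySem.Set.contains seen kv.1 <;>
          simp_all [PySem.Set.contains_eq_listContains, hseen kv.1]
      cases hPc : P.contains kv.1
      · -- key not yet productive: both test productivity, and agree
        have hnmem : kv.1 ∉ P := fun h => by
          rw [List.contains_iff_mem.mpr h] at hPc
          exact Bool.noConfusion hPc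
        have hB : sprStepB (P, seen, ok, still, b) kv =
            if sprProductive ok kv.2 then
              (P ++ [kv.1], PySem.Set.add seen kv.1, PySem.Set.add ok kv.1, still, true)
            else (P, seen, ok, still ++ [kv], b) := by
          unfold sprStepB
          rw [hseenc, hPc]
          simp
        rw [hB, sprAProd_eq terminals P ok kv.2 hok]
        cases hprod : sprProductive ok kv.2
        · -- not productive: A leaves the state, B keeps kv for the next round
          simp only [Bool.false_eq_true, if_false]
          obtain ⟨h1, h2, h3, h4⟩ :=
            ih P b seen ok (still ++ [kv]) p hnd' hseen hok hp'
          refine ⟨h1, h2, h3, ?_⟩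
          have hnc : kv.1 ∉ (rest.foldl (sprStepA terminals) (P, b)).1 := by
            intro hcc
            rcases sprFoldA_mem terminals rest P b kv.1 hcc with h' | h'
            · exact hnmem h'
            · exact hknd h'
          rw [h4]
          simp [hnc]
        · -- productive: both append the key; the set invariants follow
          simp only [Bool.false_eq_true, if_false, if_true]
          have hseen' : ∀ s : String, s ∈ PySem.Set.add seen kv.1 ↔ s ∈ P ++ [kv.1] := by
            intro s
            rw [PySem.Set.mem_add]
            simp [hseen s]
          have hok' : ∀ s : String,
              s ∈ PySem.Set.add ok kv.1 ↔ s ∈ P ++ [kv.1] ∨ s ∈ terminals := by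
            intro s
            rw [PySem.Set.mem_add]
            simp [hok s]
            tauto
          have hp'' : ∀ kv' ∈ rest, p kv' = false → kv'.1 ∈ P ++ [kv.1] :=
            fun kv' h hf => List.mem_append.mpr (Or.inl (hp' kv' h hf))
          obtain ⟨h1, h2, h3, h4⟩ := ih (P ++ [kv.1]) true (PySem.Set.add seen kv.1)
            (PySem.Set.add ok kv.1) still p hnd' hseen' hok' hp''
          refine ⟨h1, h2, h3, ?_⟩
          have hcc : kv.1 ∈ (rest.foldl (sprStepA terminals) (P ++ [kv.1], true)).1 :=
            (sprFoldA_prefix terminals rest (P ++ [kv.1]) true).subset (by simp)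
          rw [h4]
          simp [hcc]
      · -- key already productive: A's guard and B's `continue` both skip
        have hB : sprStepB (P, seen, ok, still, b) kv = (P, seen, ok, still, b) := by
          unfold sprStepB
          rw [hseenc, hPc]
          simp
        rw [hB]
        simp only [if_true]
        obtain ⟨h1, h2, h3, h4⟩ := ih P b seen ok still p hnd' hseen hok hp'
        refine ⟨h1, h2, h3, ?_⟩
        have hcc : kv.1 ∈ (rest.foldl (sprStepA terminals) (P, b)).1 :=
          (sprFoldA_prefix terminals rest P b).subset (List.contains_iff_mem.mp hPc)
        rw [h4]
        simp [hcc]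

-- the loops agree round by round
lemma sprLoop_eq (terminals : List String) (items : List (String × List String))
    (hnd : (items.map Prod.fst).Nodup) :
    ∀ (n : Nat) (P : List String) (seen ok : PySem.Set String)
      (p : String × List String → Bool),
      (∀ s : String, s ∈ seen ↔ s ∈ P) →
      (∀ s : String, s ∈ ok ↔ s ∈ P ∨ s ∈ terminals) →
      (∀ kv ∈ items, p kv = false → kv.1 ∈ P) →
      sprLoopA items terminals n P = sprLoopB n (items.filter p) P seen ok := by
  intro n
  induction n with
  | zero => intro P seen ok p _ _ _; rfl
  | succ n ih =>
    intro P seen ok p hseen hok hp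
    obtain ⟨h1, h2, h3, h4⟩ := sprRound_eq terminals items P false seen ok [] p hnd hseen hok hp
    simp only [sprLoopA, sprLoopB, h1]
    cases hflag : ((items.filter p).foldl sprStepB (P, seen, ok, [], false)).2.2.2.2
    · simp
    · simp only [Bool.not_true, Bool.false_eq_true, if_false, if_true]
      rw [h4]
      simp only [List.nil_append]
      have h1' : (items.foldl (sprStepA terminals) (P, false)).1 =
          ((items.filter p).foldl sprStepB (P, seen, ok, [], false)).1 := by rw [h1]
      rw [← h1']
      apply ih _ _ _ (fun kv => p kv &&
        !((items.foldl (sprStepA terminals) (P, false)).1.contains kv.1)) h2 h3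
      intro kv hkv hf
      rcases Bool.and_eq_false_iff.mp hf with h' | h'
      · exact (sprFoldA_prefix terminals items P false).subset (hp kv hkv h')
      · exact List.contains_iff_mem.mp (by simpa using h')

-- ===== VERDICT (by name: the statement is the Claim_ definition above) =====
theorem search_productive_rules_spec : Claim_equal_search_productive_rules := by
  intro e P T _
  show search_productive_rules e P T = search_productive_rules_alt e P T
  have hnd : (((PySem.Dict.ofList e).items.map Prod.fst)).Nodup := PySem.Dict.nodup_keys_ofList e
  have h := sprLoop_eq T (PySem.Dict.ofList e).items hnd
    ((PySem.Dict.ofList e).items.length + 1) P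
    (PySem.Set.ofList P) (PySem.Set.union (PySem.Set.ofList P) T) (fun _ => true)
    (by intro s; exact PySem.Set.mem_ofList (xs := P) (y := s))
    (by intro s; simp [PySem.Set.mem_union, PySem.Set.mem_ofList])
    (by intro kv _ h; simp at h)
  rw [List.filter_true] at h
  exact h
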